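-- pv_equiv track=rewrite | github.com/SharynHu/leetcodepy | leet0651_DP_version2_2020-03-19.py | maxA
-- ===== SOURCE A (Python) =====
-- def maxA(N):
--     """
--     :type N: int
--     :rtype: int
--     """
--
--     dp = [0]*(N+1)
--     for i in range(1, N+1):
--         for j in range(i):
--             #如果当前是CTRLA+CTRLC+CTRV...
--             if i-j >=3:
--                 dp[i] = max(dp[i], dp[j]*(i-j-1))
--             dp[i] = max(dp[i], dp[j]+i-j)
--     return dp[-1]
-- ===== SOURCE B (Python) =====
-- def maxA(N):
--     # Linear-time DP: only the previous value (one plain press) and short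
--     # Ctrl-V runs can be optimal, so the inner scan over all j collapses
--     # to a constant-size window of recent positions.
--     dp = [0]
--     for i in range(1, N + 1):
--         best = dp[i - 1] + 1
--         for k in range(3, min(6, i) + 1):
--             best = max(best, dp[i - k] * (k - 1))
--         dp.append(best)
--     return dp[-1]
-- ===== Notes on version B (the rewrite author's own statement) =====
-- stated objective: faster
-- what changed: The inner scan over all j < i is replaced by a constant-size window of recent positions (provably no longer Ctrl-V run is ever optimal), turning the quadratic DP into a linear one.
import Mathlib
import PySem

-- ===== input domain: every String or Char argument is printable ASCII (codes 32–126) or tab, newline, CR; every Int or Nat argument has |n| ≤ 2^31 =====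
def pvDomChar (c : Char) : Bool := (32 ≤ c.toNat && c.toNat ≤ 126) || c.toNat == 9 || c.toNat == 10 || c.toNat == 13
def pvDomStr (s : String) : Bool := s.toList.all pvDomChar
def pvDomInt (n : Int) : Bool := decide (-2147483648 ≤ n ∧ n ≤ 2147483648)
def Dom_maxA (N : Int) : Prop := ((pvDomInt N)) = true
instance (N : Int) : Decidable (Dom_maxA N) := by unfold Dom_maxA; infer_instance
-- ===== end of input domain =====

-- B replaces A's quadratic scan over all previous positions by a constant-size window
-- of recent positions (no longer Ctrl-V run is ever optimal), giving a linear-time DP.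

-- ===== PORT A =====
def maxA (N : Int) : Int :=
  let dp : List Int := PySem.List.pyRepeat [(0 : Int)] (N + 1)
  let dp := (PySem.List.pyRange 1 (N + 1) 1).foldl (fun dp i =>
    (PySem.List.pyRange 0 i 1).foldl (fun dp j =>
      let dp := if i - j ≥ 3 then
          PySem.List.pySetD dp i (max (PySem.List.pyGetD dp i 0) (PySem.List.pyGetD dp j 0 * (i - j - 1)))
        else dp
      PySem.List.pySetD dp i (max (PySem.List.pyGetD dp i 0) (PySem.List.pyGetD dp j 0 + i - j))) dp) dp
  PySem.List.pyGetD dp (-1) 0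

-- ===== PORT B =====
def maxA_alt (N : Int) : Int :=
  let dp := (PySem.List.pyRange 1 (N + 1) 1).foldl (fun dp i =>
    let best := PySem.List.pyGetD dp (i - 1) 0 + 1
    let best := (PySem.List.pyRange 3 (min 6 i + 1) 1).foldl (fun best k =>
      max best (PySem.List.pyGetD dp (i - k) 0 * (k - 1))) best
    dp ++ [best]) [(0 : Int)]
  PySem.List.pyGetD dp (-1) 0

-- ===== PRECONDITION & SPEC =====
-- Pre_ excludes N < 0, where A's dp is the empty list and dp[-1] raises IndexError.
def Pre_maxA (N : Int) : Prop := 0 ≤ N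
instance (N : Int) : Decidable (Pre_maxA N) := by unfold Pre_maxA; infer_instance
def pvWitness_maxA : Int := 5

def Spec_maxA (N : Int) (out : Int) : Prop := out = maxA_alt N
instance (N : Int) (out : Int) : Decidable (Spec_maxA N out) := by unfold Spec_maxA; infer_instance

-- ===== CLAIM (what is proved, stated in full; the proofs are below) =====
def Claim_equal_maxA : Prop := ∀ (N : Int), Dom_maxA N → Pre_maxA N → Spec_maxA N (maxA N)

-- ===== LEMMAS AND PROOFS =====

-- generic bounds for a left fold
theorem pvFoldLe {α : Type} (f : Int → α → Int) (l : List α) (m B : Int)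
    (h : ∀ a j, j ∈ l → a ≤ B → f a j ≤ B) (hm : m ≤ B) : l.foldl f m ≤ B := by
  induction l generalizing m with
  | nil => simpa using hm
  | cons x t ih =>
    exact ih (f m x) (fun a j hj => h a j (List.mem_cons_of_mem _ hj)) (h m x List.mem_cons_self hm)

theorem pvLeFold {α : Type} (f : Int → α → Int) (l : List α) (m : Int)
    (hmono : ∀ a j, a ≤ f a j) : m ≤ l.foldl f m := by
  induction l generalizing m with
  | nil => simp
  | cons x t ih => exact le_trans (hmono m x) (ih _)

theorem pvCandLeFold {α : Type} (f : Int → α → Int) (l : List α) (m : Int) (j : α) (c : Int)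
    (hmono : ∀ a j, a ≤ f a j) (hj : j ∈ l) (hc : ∀ a, c ≤ f a j) : c ≤ l.foldl f m := by
  induction l generalizing m with
  | nil => simp at hj
  | cons x t ih =>
    rcases List.mem_cons.mp hj with h | h
    · subst h; exact le_trans (hc m) (pvLeFold f t _ hmono)
    · exact ih (f m x) h

-- the two DP recurrences as pure functions of the already-built table
def stepA (L : List Int) (i : Int) (m j : Int) : Int :=
  let m := if i - j ≥ 3 then max m (PySem.List.pyGetD L j 0 * (i - j - 1)) else m
  max m (PySem.List.pyGetD L j 0 + i - j)

def nextA (L : List Int) (i : Int) : Int := (PySem.List.pyRange 0 i 1).foldl (stepA L i) 0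

def nextB (L : List Int) (i : Int) : Int :=
  (PySem.List.pyRange 3 (min 6 i + 1) 1).foldl (fun best k =>
    max best (PySem.List.pyGetD L (i - k) 0 * (k - 1))) (PySem.List.pyGetD L (i - 1) 0 + 1)

def buildA : Nat → List Int
  | 0 => [0]
  | n + 1 => buildA n ++ [nextA (buildA n) ((n : Int) + 1)]

def buildB : Nat → List Int
  | 0 => [0]
  | n + 1 => buildB n ++ [nextB (buildB n) ((n : Int) + 1)]

def fv (n : Nat) : Int := (buildA n).getD n 0

theorem lenA (n : Nat) : (buildA n).length = n + 1 := by
  induction n with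
  | zero => rfl
  | succ n ih => simp [buildA, ih]

theorem prefixA {m n : Nat} (h : m ≤ n) : (buildA m) <+: (buildA n) := by
  induction n with
  | zero => simp [Nat.le_zero.mp h]
  | succ n ih =>
    rcases Nat.lt_or_ge m (n + 1) with h' | h'
    · exact (ih (Nat.lt_succ_iff.mp h')).trans ⟨_, rfl⟩
    · have : m = n + 1 := le_antisymm h h'
      subst this; exact List.prefix_rfl

theorem getA {n k : Nat} (h : k ≤ n) : (buildA n).getD k 0 = fv k := by
  obtain ⟨t, ht⟩ := prefixA h
  have hk : k < (buildA k).length := by rw [lenA]; omega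
  rw [← ht, fv, List.getD_eq_getElem?_getD, List.getD_eq_getElem?_getD,
      List.getElem?_append_left hk]

theorem pygetA {n : Nat} {j : Int} (h0 : 0 ≤ j) (hn : j ≤ (n : Int)) :
    PySem.List.pyGetD (buildA n) j 0 = fv j.toNat := by
  have : j = (j.toNat : Int) := by omega
  rw [this, PySem.List.pyGetD_natCast, getA (by omega), Int.toNat_natCast]

theorem fv_succ (n : Nat) : fv (n + 1) = nextA (buildA n) ((n : Int) + 1) := by
  have hl := lenA n
  simp [fv, buildA, List.getD_eq_getElem?_getD, hl]

-- step monotonicity in the accumulator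
theorem stepA_mono (L : List Int) (i : Int) : ∀ a j, a ≤ stepA L i a j := by
  intro a j
  unfold stepA
  split <;> simp

theorem addCand_le_nextA (L : List Int) (i j : Int) (h0 : 0 ≤ j) (hj : j < i) :
    PySem.List.pyGetD L j 0 + i - j ≤ nextA L i := by
  apply pvCandLeFold _ _ _ j _ (stepA_mono L i)
  · exact (PySem.List.mem_pyRange_one).mpr ⟨h0, hj⟩
  · intro a; unfold stepA; simp

theorem mulCand_le_nextA (L : List Int) (i j : Int) (h0 : 0 ≤ j) (hj : j < i) (h3 : 3 ≤ i - j) :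
    PySem.List.pyGetD L j 0 * (i - j - 1) ≤ nextA L i := by
  apply pvCandLeFold _ _ _ j _ (stepA_mono L i)
  · exact (PySem.List.mem_pyRange_one).mpr ⟨h0, hj⟩
  · intro a; unfold stepA
    rw [if_pos (by omega)]
    simp

theorem fv_zero : fv 0 = 0 := rfl

theorem fv_succ_ge (n : Nat) : fv n + 1 ≤ fv (n + 1) := by
  rw [fv_succ]
  have h := addCand_le_nextA (buildA n) ((n : Int) + 1) (n : Int) (by omega) (by omega)
  rw [pygetA (by omega) (by omega)] at h
  simp at h
  omega

theorem fv_gap (d a : Nat) : fv a + (d : Int) ≤ fv (a + d) := by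
  induction d with
  | zero => simp
  | succ d ih =>
    have h2 := fv_succ_ge (a + d)
    rw [show a + (d + 1) = (a + d) + 1 from rfl, show ((d + 1 : Nat) : Int) = (d : Int) + 1 by push_cast; ring]
    omega

theorem fv_nonneg (n : Nat) : 0 ≤ fv n := by
  have := fv_gap n 0
  simp [fv_zero] at this
  omega

theorem fv_triple (n : Nat) : 2 * fv n ≤ fv (n + 3) := by
  have h := mulCand_le_nextA (buildA (n + 2)) ((n : Int) + 3) (n : Int) (by omega) (by omega) (by omega)
  rw [pygetA (by omega) (by omega)] at h
  have e := fv_succ (n + 2)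
  rw [show ((n + 2 : Nat) : Int) + 1 = (n : Int) + 3 by push_cast; ring] at e
  have h2 : fv n * 2 ≤ nextA (buildA (n + 2)) ((n : Int) + 3) := by
    have e2 : ((n : Int) + 3 - n - 1) = 2 := by ring
    simpa [e2] using h
  rw [e]
  omega

-- the heart: the full scan equals the bounded-window scan on a table with the DP growth invariants
theorem window_core (L : List Int) (n : Nat)
    (hget : ∀ j : Int, 0 ≤ j → j ≤ (n : Int) → PySem.List.pyGetD L j 0 = fv j.toNat) :
    nextA L ((n : Int) + 1) = nextB L ((n : Int) + 1) := by
  have hmonoB : ∀ (a k : Int), a ≤ max a (PySem.List.pyGetD L (((n : Int) + 1) - k) 0 * (k - 1)) :=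
    fun a k => le_max_left _ _
  have hVB : fv n + 1 ≤ nextB L ((n : Int) + 1) := by
    unfold nextB
    rw [show ((n : Int) + 1) - 1 = ((n : Nat) : Int) by ring, hget _ (by omega) (by omega),
        Int.toNat_natCast]
    exact pvLeFold _ _ _ hmonoB
  -- every sufficiently long run is dominated by a shorter one: inductive domination lemma
  have key : ∀ (t : Nat) (j : Int), 0 ≤ j → 3 ≤ ((n : Int) + 1) - j → (((n : Int) + 1) - j).toNat ≤ t →
      fv j.toNat * (((n : Int) + 1) - j - 1) ≤ nextB L ((n : Int) + 1) := by
    intro t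
    induction t with
    | zero => intro j h0 h3 hle; omega
    | succ t ih =>
      intro j h0 h3 hle
      rcases le_or_gt (((n : Int) + 1) - j) 6 with h6 | h6
      · -- direct window candidate k = (n+1) - j
        unfold nextB
        apply pvCandLeFold _ _ _ (((n : Int) + 1) - j) _ hmonoB
        · exact (PySem.List.mem_pyRange_one).mpr ⟨h3, by omega⟩
        · intro a
          rw [show ((n : Int) + 1) - (((n : Int) + 1) - j) = j by ring, hget j h0 (by omega)]
          exact le_max_right _ _
      · -- replace the run from j by the strictly better run from j + 3
        have ht := fv_triple j.toNat
        have hnn := fv_nonneg j.toNat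
        have hstep : fv j.toNat * (((n : Int) + 1) - j - 1)
            ≤ fv (j.toNat + 3) * (((n : Int) + 1) - (j + 3) - 1) := by
          have h1 : fv j.toNat * (((n : Int) + 1) - j - 1)
              ≤ fv j.toNat * (2 * (((n : Int) + 1) - j - 4)) :=
            mul_le_mul_of_nonneg_left (by omega) hnn
          have h2 : fv j.toNat * (2 * (((n : Int) + 1) - j - 4))
              = (2 * fv j.toNat) * (((n : Int) + 1) - j - 4) := by ring
          have h3' : (2 * fv j.toNat) * (((n : Int) + 1) - j - 4)
              ≤ fv (j.toNat + 3) * (((n : Int) + 1) - j - 4) :=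
            mul_le_mul_of_nonneg_right ht (by omega)
          have h4 : ((n : Int) + 1) - (j + 3) - 1 = ((n : Int) + 1) - j - 4 := by ring
          rw [h4]; omega
        have hrec := ih (j + 3) (by omega) (by omega) (by omega)
        rw [show (j + 3).toNat = j.toNat + 3 by omega] at hrec
        exact le_trans hstep hrec
  apply le_antisymm
  · -- full scan ≤ window scan
    unfold nextA
    apply pvFoldLe
    · intro a j hj ha
      have hmem := (PySem.List.mem_pyRange_one).mp hj
      unfold stepA
      rw [hget j hmem.1 (by omega)]
      have hadd : fv j.toNat + ((n : Int) + 1) - j ≤ nextB L ((n : Int) + 1) := by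
        have g := fv_gap (n - j.toNat) j.toNat
        rw [show j.toNat + (n - j.toNat) = n by omega] at g
        have hc : ((n - j.toNat : Nat) : Int) = (n : Int) - j := by omega
        rw [hc] at g
        omega
      by_cases h3 : ((n : Int) + 1) - j ≥ 3
      · rw [if_pos h3]
        exact max_le (max_le ha (key ((((n : Int) + 1) - j).toNat) j hmem.1 h3 le_rfl)) hadd
      · rw [if_neg h3]
        exact max_le ha hadd
    · -- initial accumulator 0
      have := fv_nonneg n
      omega
  · -- window scan ≤ full scan
    unfold nextB
    apply pvFoldLe
    · intro a k hk ha
      have hmem := (PySem.List.mem_pyRange_one).mp hk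
      apply max_le ha
      have h1 : (0 : Int) ≤ ((n : Int) + 1) - k := by omega
      have h2 : ((n : Int) + 1) - k < (n : Int) + 1 := by omega
      have h3 : 3 ≤ ((n : Int) + 1) - (((n : Int) + 1) - k) := by omega
      have := mulCand_le_nextA L ((n : Int) + 1) (((n : Int) + 1) - k) h1 h2 h3
      rw [show ((n : Int) + 1) - (((n : Int) + 1) - k) - 1 = k - 1 by ring] at this
      exact this
    · have := addCand_le_nextA L ((n : Int) + 1) (((n : Int) + 1) - 1) (by omega) (by omega)
      omega

theorem window_eq (n : Nat) :
    nextA (buildA n) ((n : Int) + 1) = nextB (buildA n) ((n : Int) + 1) := by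
  exact window_core (buildA n) n (fun j h0 hn => pygetA h0 hn)

theorem buildAB (n : Nat) : buildA n = buildB n := by
  induction n with
  | zero => rfl
  | succ n ih => rw [buildA, buildB, ← ih, ← window_eq]

-- ===== port B correctness =====
theorem altFold (n : Nat) :
    (PySem.List.pyRange 1 ((n : Int) + 1) 1).foldl (fun dp i =>
      let best := PySem.List.pyGetD dp (i - 1) 0 + 1
      let best := (PySem.List.pyRange 3 (min 6 i + 1) 1).foldl (fun best k =>
        max best (PySem.List.pyGetD dp (i - k) 0 * (k - 1))) best
      dp ++ [best]) [(0 : Int)] = buildB n := by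
  induction n with
  | zero => rw [PySem.List.pyRange_one_eq_nil (by omega)]; rfl
  | succ n ih =>
    have e : ((n + 1 : Nat) : Int) + 1 = ((n : Int) + 1) + 1 := by push_cast; ring
    rw [e, PySem.List.pyRange_one_succ_right (by omega), List.foldl_append, ih]
    rfl

theorem lastB (n : Nat) : PySem.List.pyGetD (buildB n) (-1) 0 = fv n := by
  cases n with
  | zero => rfl
  | succ n =>
    rw [buildB, PySem.List.pyGetD_neg_one_append_singleton, ← buildAB, ← window_eq, ← fv_succ]

theorem alt_eq_fv (N : Int) (h : 0 ≤ N) : maxA_alt N = fv N.toNat := by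
  unfold maxA_alt
  rw [show N + 1 = ((N.toNat : Int)) + 1 by omega, altFold, lastB]

-- ===== port A correctness =====
theorem set_append_cons (P Z : List Int) (m v : Int) :
    (P ++ m :: Z).set P.length v = P ++ v :: Z := by
  induction P with
  | nil => rfl
  | cons x t ih => simp [ih]

theorem pg_at_len (P Z : List Int) (m : Int) :
    PySem.List.pyGetD (P ++ m :: Z) ((P.length : Nat) : Int) 0 = m := by
  rw [PySem.List.pyGetD_natCast]
  simp [List.getD_eq_getElem?_getD]

theorem pg_lt (P Z : List Int) (j : Int) (h0 : 0 ≤ j) (hj : j < (P.length : Int)) :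
    PySem.List.pyGetD (P ++ Z) j 0 = PySem.List.pyGetD P j 0 := by
  rw [show j = ((j.toNat : Nat) : Int) by omega, PySem.List.pyGetD_natCast, PySem.List.pyGetD_natCast]
  rw [List.getD_eq_getElem?_getD, List.getD_eq_getElem?_getD, List.getElem?_append_left (by omega)]

theorem innerA_eq (P Z : List Int) (i : Int) (hi : i = (P.length : Int)) :
    ∀ (t : Nat) (a m : Int), 0 ≤ a → (i - a).toNat ≤ t →
    (PySem.List.pyRange a i 1).foldl (fun dp j =>
      let dp := if i - j ≥ 3 then
          PySem.List.pySetD dp i (max (PySem.List.pyGetD dp i 0) (PySem.List.pyGetD dp j 0 * (i - j - 1)))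
        else dp
      PySem.List.pySetD dp i (max (PySem.List.pyGetD dp i 0) (PySem.List.pyGetD dp j 0 + i - j)))
      (P ++ m :: Z)
    = P ++ ((PySem.List.pyRange a i 1).foldl (stepA P i) m) :: Z := by
  have hgi : ∀ (m' : Int), PySem.List.pyGetD (P ++ m' :: Z) i 0 = m' := by
    intro m'; rw [hi]; exact pg_at_len P Z m'
  have hset : ∀ (m' v : Int), PySem.List.pySetD (P ++ m' :: Z) i v = P ++ v :: Z := by
    intro m' v
    rw [PySem.List.pySetD_of_nonneg (P ++ m' :: Z) v (by omega)]
    have e : i.toNat = P.length := by omega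
    rw [e, set_append_cons]
  intro t
  induction t with
  | zero =>
    intro a m ha hle
    rw [PySem.List.pyRange_one_eq_nil (by omega)]
    rfl
  | succ t ih =>
    intro a m ha hle
    by_cases hai : i ≤ a
    · rw [PySem.List.pyRange_one_eq_nil hai]
      rfl
    · have hgj : ∀ (m' : Int), PySem.List.pyGetD (P ++ m' :: Z) a 0 = PySem.List.pyGetD P a 0 := by
        intro m'; exact pg_lt P (m' :: Z) a ha (by omega)
      rw [PySem.List.pyRange_one_cons (by omega)]
      simp only [List.foldl_cons, stepA]
      by_cases h3 : i - a ≥ 3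
      · simp only [if_pos h3, hgi, hgj, hset]
        exact ih (a + 1) _ (by omega) (by omega)
      · simp only [if_neg h3, hgi, hgj, hset]
        exact ih (a + 1) _ (by omega) (by omega)

theorem outerA (N : Int) (_hN : 0 ≤ N) (m : Nat) (hm : m ≤ N.toNat) :
    (PySem.List.pyRange 1 ((m : Int) + 1) 1).foldl (fun dp i =>
      (PySem.List.pyRange 0 i 1).foldl (fun dp j =>
        let dp := if i - j ≥ 3 then
            PySem.List.pySetD dp i (max (PySem.List.pyGetD dp i 0) (PySem.List.pyGetD dp j 0 * (i - j - 1)))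
          else dp
        PySem.List.pySetD dp i (max (PySem.List.pyGetD dp i 0) (PySem.List.pyGetD dp j 0 + i - j))) dp)
      (List.replicate (N.toNat + 1) 0)
    = buildA m ++ List.replicate (N.toNat - m) 0 := by
  induction m with
  | zero =>
    rw [show (((0 : Nat) : Int) + 1) = 1 by norm_num, PySem.List.pyRange_one_eq_nil (by omega)]
    simp [buildA, List.replicate_succ]
  | succ m ih =>
    have hm' : m ≤ N.toNat := by omega
    have e : ((m + 1 : Nat) : Int) + 1 = ((m : Int) + 1) + 1 := by push_cast; ring
    rw [e, PySem.List.pyRange_one_succ_right (by omega), List.foldl_append, ih hm']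
    simp only [List.foldl_cons, List.foldl_nil]
    rw [show N.toNat - m = (N.toNat - m - 1) + 1 by omega, List.replicate_succ]
    have hi : ((m : Int) + 1) = (((buildA m).length : Nat) : Int) := by rw [lenA]; push_cast; ring
    rw [innerA_eq (buildA m) (List.replicate (N.toNat - m - 1) 0) ((m : Int) + 1) hi
        (((m : Int) + 1) - 0).toNat 0 0 (by omega) (by omega)]
    rw [show ((PySem.List.pyRange 0 ((m : Int) + 1) 1).foldl (stepA (buildA m) ((m : Int) + 1)) 0)
          = nextA (buildA m) ((m : Int) + 1) from rfl]
    rw [buildA, List.append_cons, show N.toNat - m - 1 = N.toNat - (m + 1) by omega]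

theorem a_eq_fv (N : Int) (h : 0 ≤ N) : maxA N = fv N.toNat := by
  have e0 : maxA N = PySem.List.pyGetD
      ((PySem.List.pyRange 1 (N + 1) 1).foldl (fun dp i =>
        (PySem.List.pyRange 0 i 1).foldl (fun dp j =>
          let dp := if i - j ≥ 3 then
              PySem.List.pySetD dp i (max (PySem.List.pyGetD dp i 0) (PySem.List.pyGetD dp j 0 * (i - j - 1)))
            else dp
          PySem.List.pySetD dp i (max (PySem.List.pyGetD dp i 0) (PySem.List.pyGetD dp j 0 + i - j))) dp)
        (PySem.List.pyRepeat [(0 : Int)] (N + 1))) (-1) 0 := rfl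
  rw [e0, PySem.List.pyRepeat_singleton, show (N + 1).toNat = N.toNat + 1 by omega,
      show N + 1 = ((N.toNat : Int)) + 1 by omega,
      outerA N h N.toNat le_rfl]
  simp only [Nat.sub_self, List.replicate_zero, List.append_nil]
  rw [buildAB, lastB]

-- ===== VERDICT (by name: the statement is the Claim_ definition above) =====
theorem maxA_spec : Claim_equal_maxA := by
  intro N _ hpre
  unfold Spec_maxA
  rw [a_eq_fv N hpre, alt_eq_fv N hpre]
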